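-- pv_equiv track=rewrite | github.com/jmv2009/fiat | FIAT/Sminus.py | determine_I_lambda_1_portions_3d
-- ===== SOURCE A (Python) =====
-- def determine_I_lambda_1_portions_3d(deg):
--     if (deg < 4):
--         DegsOfIteration = []
--     else:
--         Degs = tuple([])
--         DegsOfIteration = tuple([])
--         for x in range(0, deg - 3):
--             for y in range(0, deg - 3 - x):
--                 for z in range(0, deg - 3 - x - y):
--                     Degs += tuple([(x, y, z)])
--         for degs in Degs:
--             if(degs[0] + degs[1] + degs[2] == deg - 4):
--                 DegsOfIteration += tuple([degs])
--     return DegsOfIteration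
-- ===== SOURCE B (Python) =====
-- def determine_I_lambda_1_portions_3d(deg):
--     # O(n^2): z is determined by x and y, so enumerate x, y only.
--     if deg < 4:
--         return []
--     n = deg - 4
--     return tuple((x, y, n - x - y) for x in range(n + 1) for y in range(n - x + 1))
-- ===== Notes on version B (the rewrite author's own statement) =====
-- stated objective: faster
-- what changed: Instead of materialising the full cube of (x,y,z) triples by repeated tuple concatenation and then filtering for x+y+z==deg-4, B enumerates x and y and sets z=deg-4-x-y directly.
import Mathlib
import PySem

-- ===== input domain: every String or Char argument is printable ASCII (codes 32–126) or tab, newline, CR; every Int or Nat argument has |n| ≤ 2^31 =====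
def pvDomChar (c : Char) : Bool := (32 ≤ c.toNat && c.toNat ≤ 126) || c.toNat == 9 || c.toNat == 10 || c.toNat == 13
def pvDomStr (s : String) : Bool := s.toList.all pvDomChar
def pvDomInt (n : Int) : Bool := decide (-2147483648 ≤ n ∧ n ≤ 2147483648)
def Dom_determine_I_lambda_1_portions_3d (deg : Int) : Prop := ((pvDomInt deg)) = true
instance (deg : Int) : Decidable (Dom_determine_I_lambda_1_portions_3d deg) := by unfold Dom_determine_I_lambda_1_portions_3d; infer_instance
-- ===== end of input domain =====

-- B replaces A's cube enumeration + filter by direct enumeration of (x, y) with z = deg-4-x-y (objective: faster, asymptotic).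


-- ===== PORT A =====
-- Triples are lists [x, y, z].  degs[0] is ported as pyGetD degs 0 0: every element of
-- Degs has length 3, so the index is always in range and the default is never used.
def determine_I_lambda_1_portions_3d (deg : Int) : List (List Int) :=
  if deg < 4 then []
  else
    let Degs : List (List Int) :=
      (PySem.List.pyRange 0 (deg - 3) 1).foldl (fun accx x =>
        (PySem.List.pyRange 0 (deg - 3 - x) 1).foldl (fun accy y =>
          (PySem.List.pyRange 0 (deg - 3 - x - y) 1).foldl (fun accz z =>
            accz ++ [[x, y, z]]) accy) accx) []
    Degs.foldl (fun acc degs =>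
      if PySem.List.pyGetD degs 0 0 + PySem.List.pyGetD degs 1 0 + PySem.List.pyGetD degs 2 0 == deg - 4
      then acc ++ [degs] else acc) []

-- ===== PORT B =====
def determine_I_lambda_1_portions_3d_alt (deg : Int) : List (List Int) :=
  if deg < 4 then []
  else
    let n := deg - 4
    (PySem.List.pyRange 0 (n + 1) 1).flatMap (fun x =>
      (PySem.List.pyRange 0 (n - x + 1) 1).map (fun y => [x, y, n - x - y]))

-- ===== PRECONDITION & SPEC =====
def Spec_determine_I_lambda_1_portions_3d (deg : Int) (out : List (List Int)) : Prop := out = determine_I_lambda_1_portions_3d_alt deg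
instance (deg : Int) (out : List (List Int)) : Decidable (Spec_determine_I_lambda_1_portions_3d deg out) := by unfold Spec_determine_I_lambda_1_portions_3d; infer_instance

-- ===== CLAIM (what is proved, stated in full; the proofs are below) =====
def Claim_equal_determine_I_lambda_1_portions_3d : Prop := ∀ (deg : Int), Dom_determine_I_lambda_1_portions_3d deg → Spec_determine_I_lambda_1_portions_3d deg (determine_I_lambda_1_portions_3d deg)

-- ===== LEMMAS AND PROOFS =====

-- The filter predicate of A, applied to the triple [x, y, z], tests z == deg-4-x-y.
theorem pv_triple_pred (x y z deg : Int) :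
    (PySem.List.pyGetD [x, y, z] 0 0 + PySem.List.pyGetD [x, y, z] 1 0 + PySem.List.pyGetD [x, y, z] 2 0 == deg - 4)
      = (z == deg - 4 - x - y) := by
  simp only [PySem.List.pyGetD, PySem.List.pyGet?, PySem.List.pyIdx?]
  norm_num
  simp
  omega

-- flatMap of singletons is map.
theorem pv_flatMap_singleton {α β : Type} (l : List α) (f : α → List β) :
    l.flatMap (fun y => [f y]) = l.map f := by
  induction l with
  | nil => rfl
  | cons h t ih => simp [List.flatMap_cons, ih]

-- Filtering a 1-step range for the unique value m keeps exactly [m] when a ≤ m < b.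
theorem pv_filter_pyRange_eq_single (a b m : Int) (h1 : a ≤ m) (h2 : m < b) :
    (PySem.List.pyRange a b 1).filter (fun z => z == m) = [m] := by
  rw [PySem.List.pyRange_one_append a m b h1 (by omega),
      PySem.List.pyRange_one_cons (by omega : m < b)]
  rw [List.filter_append]
  have hl : (PySem.List.pyRange a m 1).filter (fun z => z == m) = [] := by
    rw [List.filter_eq_nil_iff]
    intro z hz
    have := (PySem.List.mem_pyRange_one).1 hz
    simp only [beq_iff_eq]
    omega
  have hr : (PySem.List.pyRange (m + 1) b 1).filter (fun z => z == m) = [] := by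
    rw [List.filter_eq_nil_iff]
    intro z hz
    have := (PySem.List.mem_pyRange_one).1 hz
    simp only [beq_iff_eq]
    omega
  simp [hl, hr]

-- ===== VERDICT (by name: the statement is the Claim_ definition above) =====
theorem determine_I_lambda_1_portions_3d_spec : Claim_equal_determine_I_lambda_1_portions_3d := by
  intro deg _
  unfold Spec_determine_I_lambda_1_portions_3d
  unfold determine_I_lambda_1_portions_3d determine_I_lambda_1_portions_3d_alt
  by_cases hd : deg < 4
  · simp [hd]
  · simp only [if_neg hd]
    -- turn A's folds into flatMap / map / filter shape
    simp only [PySem.List.foldl_append_singleton_eq_map, PySem.List.foldl_append_eq_flatMap,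
      PySem.List.foldl_append_if_eq_filter, List.nil_append]
    rw [List.filter_flatMap]
    have e1 : PySem.List.pyRange 0 (deg - 3) 1 = PySem.List.pyRange 0 (deg - 4 + 1) 1 := by ring_nf
    rw [e1]
    apply List.flatMap_congr
    intro x hx
    have hxr := (PySem.List.mem_pyRange_one).1 hx
    rw [List.filter_flatMap]
    have e2 : PySem.List.pyRange 0 (deg - 3 - x) 1 = PySem.List.pyRange 0 (deg - 4 - x + 1) 1 := by ring_nf
    rw [e2]
    calc (PySem.List.pyRange 0 (deg - 4 - x + 1) 1).flatMap (fun y =>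
            ((PySem.List.pyRange 0 (deg - 3 - x - y) 1).map (fun z => [x, y, z])).filter
              (fun l => PySem.List.pyGetD l 0 0 + PySem.List.pyGetD l 1 0 + PySem.List.pyGetD l 2 0 == deg - 4))
        = (PySem.List.pyRange 0 (deg - 4 - x + 1) 1).flatMap (fun y => [[x, y, deg - 4 - x - y]]) := by
          apply List.flatMap_congr
          intro y hy
          have hyr := (PySem.List.mem_pyRange_one).1 hy
          rw [List.filter_map]
          rw [List.filter_congr (q := fun z => z == deg - 4 - x - y) ?_]
          · rw [pv_filter_pyRange_eq_single 0 (deg - 3 - x - y) (deg - 4 - x - y) (by omega) (by omega)]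
            simp
          · intro z hz
            exact pv_triple_pred x y z deg
      _ = (PySem.List.pyRange 0 (deg - 4 - x + 1) 1).map (fun y => [x, y, deg - 4 - x - y]) :=
          pv_flatMap_singleton _ _
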